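-- pv_equiv track=rewrite | github.com/isaiahaiasi/aoc-2022 | day10/day10.py | part_2
-- ===== SOURCE A (Python) =====
-- def get_register_history(input):
--     cycles = [1]
--     x = 1
--     for op in input:
--         cycles.append(x)
--         if len(op) == 1:
--             continue
--         x += int(op[1])
--         cycles.append(x)
--     return cycles
--
-- def part_2(input):
--     reg_history = get_register_history(input)
--     output = []
--     for i, reg in enumerate(reg_history[:-1]):
--         pixels = [n % 40 for n in range(reg-1, reg+2)]
--         pixel = '#' if i % 40 in pixels else '_'
--         output.append(pixel)
--         if i % 40 + 1 == 40:
--             output.append('\n')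
--     return ''.join(output)  # avoids expensive string concatenation
-- ===== SOURCE B (Python) =====
-- def part_2(input):
--     x = 1
--     i = 0
--     output = []
--
--     def draw(x, i, output):
--         col = i % 40
--         output.append('#' if col in ((x - 1) % 40, x % 40, (x + 1) % 40) else '_')
--         if col == 39:
--             output.append('\n')
--         return i + 1
--
--     for op in input:
--         i = draw(x, i, output)
--         if len(op) != 1:
--             i = draw(x, i, output)
--             x += int(op[1])
--     return ''.join(output)
-- ===== Notes on version B (the rewrite author's own statement) =====
-- stated objective: simpler
-- what changed: Drops get_register_history and the intermediate register list entirely; renders the CRT in one fused pass over the instructions, drawing one pixel per noop and two per addx before updating x.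
import Mathlib
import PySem

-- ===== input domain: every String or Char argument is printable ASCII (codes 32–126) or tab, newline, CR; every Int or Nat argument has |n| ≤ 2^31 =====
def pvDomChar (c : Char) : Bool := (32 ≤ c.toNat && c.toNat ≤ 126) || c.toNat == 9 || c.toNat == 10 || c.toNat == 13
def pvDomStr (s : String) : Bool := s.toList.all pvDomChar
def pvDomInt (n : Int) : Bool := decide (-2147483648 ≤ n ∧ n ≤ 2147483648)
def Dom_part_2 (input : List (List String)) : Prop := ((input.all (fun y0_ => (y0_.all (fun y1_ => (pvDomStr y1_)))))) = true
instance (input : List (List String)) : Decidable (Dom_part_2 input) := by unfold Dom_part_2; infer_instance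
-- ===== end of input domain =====

-- B fuses the history construction and the rendering into one pass over the instructions (same cost; Pre_ excludes inputs where A raises).

-- ===== PORT A =====
-- the value of int(op[1]); Pre_ guarantees op[1] exists and parses, so the defaults are never taken inside Pre_
def pvArg (op : List String) : Int :=
  (PySem.Int.ofStr? (PySem.List.pyGetD op 1 "")).getD 0

-- the loop of get_register_history, carrying (cycles, x)
def pvHistLoop (input : List (List String)) (cycles : List Int) (x : Int) : List Int :=
  match input with
  | [] => cycles
  | op :: ops =>
    let cycles := cycles ++ [x]
    if op.length = 1 then pvHistLoop ops cycles x
    else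
      let x := x + pvArg op
      pvHistLoop ops (cycles ++ [x]) x

def get_register_history (input : List (List String)) : List Int :=
  pvHistLoop input [1] 1

-- the rendering loop of A: 'for i, reg in enumerate(reg_history[:-1])', carrying i and output
def pvRenderLoop (regs : List Int) (i : Int) (output : List String) : List String :=
  match regs with
  | [] => output
  | reg :: rest =>
    let pixels := (PySem.List.pyRange (reg - 1) (reg + 2) 1).map (fun n => PySem.Int.mod n 40)
    let pixel := if PySem.Int.mod i 40 ∈ pixels then "#" else "_"
    let output := output ++ [pixel]
    let output := if PySem.Int.mod i 40 + 1 = 40 then output ++ ["\n"] else output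
    pvRenderLoop rest (i + 1) output

def part_2 (input : List (List String)) : String :=
  let reg_history := get_register_history input
  let sliced := PySem.List.slice reg_history none (some (-1))   -- reg_history[:-1]
  PySem.Str.join "" (pvRenderLoop sliced 0 [])

-- ===== PORT B =====
-- helper draw(x, i, output): appends one pixel (and '\n' after column 39), returns the new output and i+1
def pvDraw (x i : Int) (output : List String) : List String × Int :=
  let col := PySem.Int.mod i 40
  let output := output ++
    [if col = PySem.Int.mod (x - 1) 40 ∨ col = PySem.Int.mod x 40 ∨ col = PySem.Int.mod (x + 1) 40
     then "#" else "_"]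
  (if col = 39 then output ++ ["\n"] else output, i + 1)

-- the single fused loop of B, carrying (x, i, output)
def pvLoopB (input : List (List String)) (x i : Int) (output : List String) : List String :=
  match input with
  | [] => output
  | op :: ops =>
    let (output, i) := pvDraw x i output
    if op.length ≠ 1 then
      let (output, i) := pvDraw x i output
      pvLoopB ops (x + pvArg op) i output
    else
      pvLoopB ops x i output

def part_2_alt (input : List (List String)) : String :=
  PySem.Str.join "" (pvLoopB input 1 0 [])

-- ===== PRECONDITION & SPEC =====
-- Pre_ excludes exactly the inputs on which Python A raises: an op that is not a 1-token noop must have a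
-- second token that int() parses (otherwise int(op[1]) raises ValueError, or op[1] raises IndexError).
def Pre_part_2 (input : List (List String)) : Prop :=
  ∀ op ∈ input, op.length = 1 ∨ (PySem.Int.ofStr? (PySem.List.pyGetD op 1 "")).isSome
instance (input : List (List String)) : Decidable (Pre_part_2 input) := by unfold Pre_part_2; infer_instance

def pvWitness_part_2 : List (List String) := [["noop"], ["addx", "3"]]

def Spec_part_2 (input : List (List String)) (out : String) : Prop := out = part_2_alt input
instance (input : List (List String)) (out : String) : Decidable (Spec_part_2 input out) := by unfold Spec_part_2; infer_instance

-- ===== CLAIM (what is proved, stated in full; the proofs are below) =====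
def Claim_equal_part_2 : Prop := ∀ (input : List (List String)), Dom_part_2 input → Pre_part_2 input → Spec_part_2 input (part_2 input)

-- ===== LEMMAS AND PROOFS =====

-- the list of register values the CRT draws, one per cycle (proof-only characterisation)
def pvPix (x : Int) (input : List (List String)) : List Int :=
  match input with
  | [] => []
  | op :: ops =>
    if op.length = 1 then x :: pvPix x ops
    else x :: x :: pvPix (x + pvArg op) ops

-- helper: tail of the history produced by the loop
def pvGo (x : Int) (input : List (List String)) : List Int :=
  match input with
  | [] => []
  | op :: ops =>
    if op.length = 1 then x :: pvGo x ops
    else x :: (x + pvArg op) :: pvGo (x + pvArg op) ops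

lemma pvHistLoop_eq (input : List (List String)) :
    ∀ (cycles : List Int) (x : Int),
      pvHistLoop input cycles x = cycles ++ pvGo x input := by
  induction input with
  | nil => simp [pvHistLoop, pvGo]
  | cons op ops ih =>
    intro cycles x
    by_cases h : op.length = 1 <;> simp [pvHistLoop, pvGo, h, ih]

lemma pvDropLast_go (input : List (List String)) :
    ∀ x : Int, (x :: pvGo x input).dropLast = pvPix x input := by
  induction input with
  | nil => simp [pvGo, pvPix]
  | cons op ops ih =>
    intro x
    by_cases h : op.length = 1 <;>
      simp [pvGo, pvPix, h, List.dropLast_cons₂, ih]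

lemma pvDraw_eq (x i : Int) (output : List String) :
    pvDraw x i output =
      ((if PySem.Int.mod i 40 + 1 = 40 then
          output ++
            [if PySem.Int.mod i 40 ∈
                (PySem.List.pyRange (x - 1) (x + 2) 1).map (fun n => PySem.Int.mod n 40)
             then "#" else "_"] ++ ["\n"]
        else
          output ++
            [if PySem.Int.mod i 40 ∈
                (PySem.List.pyRange (x - 1) (x + 2) 1).map (fun n => PySem.Int.mod n 40)
             then "#" else "_"]), i + 1) := by
  have hrange : PySem.List.pyRange (x - 1) (x + 2) 1 = [x - 1, x, x + 1] := by
    rw [PySem.List.pyRange_one_cons (by omega)]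
    rw [show x - 1 + 1 = x by ring]
    rw [PySem.List.pyRange_one_cons (by omega)]
    rw [show x + 2 = (x + 1) + 1 by ring, PySem.List.pyRange_one_singleton]
  have h39 : (PySem.Int.mod i 40 = 39) ↔ (PySem.Int.mod i 40 + 1 = 40) := by omega
  rw [pvDraw, hrange]
  simp only [List.map_cons, List.map_nil, List.mem_cons, List.not_mem_nil, or_false,
    List.append_assoc, List.cons_append, List.nil_append]
  rw [if_congr h39 rfl rfl]

lemma pvLoopB_eq (input : List (List String)) :
    ∀ (x i : Int) (output : List String),
      pvLoopB input x i output = pvRenderLoop (pvPix x input) i output := by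
  induction input with
  | nil => intro x i output; rfl
  | cons op ops ih =>
    intro x i output
    by_cases h : op.length = 1
    · simp only [pvLoopB, pvDraw_eq, pvPix, pvRenderLoop, h, ne_eq, not_true_eq_false,
        if_false, if_true, ih]
    · simp only [pvLoopB, pvDraw_eq, pvPix, pvRenderLoop, h, ne_eq, not_false_eq_true,
        if_false, if_true, ih]

-- ===== VERDICT (by name: the statement is the Claim_ definition above) =====
theorem part_2_spec : Claim_equal_part_2 := by
  intro input _ _
  unfold Spec_part_2
  simp only [part_2, part_2_alt, get_register_history, pvHistLoop_eq,
    PySem.List.slice_to_neg_one, List.singleton_append, pvDropLast_go, pvLoopB_eq]
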